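-- pv_equiv track=rewrite | github.com/Szymon-Budziak/Algorithms_and_Data_Structures_course_AGH | Exercises 7/06_exercise.py | build_tower
-- ===== SOURCE A (Python) =====
-- def build_tower(T):
--     summary = []
--     for i in range(len(T)):
--         T[i].sort()
--         summary.append(sum(T[i]))
--     count = tower_height = idx = 0
--     while tower_height < max(summary):
--         maximum = 0
--         for i in range(len(T)):
--             if len(T[i]) != 0:
--                 if T[i][-1] > maximum:
--                     maximum = T[i][-1]
--                     idx = i
--         height = T[idx].pop()
--         tower_height += height
--         summary[idx] -= height
--         count += 1
--     return count
-- ===== SOURCE B (Python) =====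
-- # B: flatten all elements as (value, pile-index) pairs, sort them once in the order A pops
-- # (descending value, ascending pile index), then a single pass over that list maintaining the
-- # pile sums. A mutates T in place (sorts piles, pops elements); B does not — the equivalence
-- # proved is about the return value only.
-- def build_tower(T):
--     sums = [sum(p) for p in T]
--     order = sorted(((v, i) for i, p in enumerate(T) for v in p), key=lambda t: (-t[0], t[1]))
--     tower = 0
--     count = 0
--     for v, i in order:
--         if tower >= max(sums):
--             break
--         tower += v
--         sums[i] -= v
--         count += 1
--     return count
-- ===== Notes on version B (the rewrite author's own statement) =====
-- stated objective: alternative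
-- what changed: B replaces A's per-step scan over all piles for the largest top with one global sort of all (value, pile-index) pairs in A's pop order (descending value, ascending pile index) followed by a single pass that maintains the pile sums; A's in-place pile sorting and popping disappear.
-- outside the precondition, e.g. on build_tower([]): A raises ValueError, B returns 0
import Mathlib
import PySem

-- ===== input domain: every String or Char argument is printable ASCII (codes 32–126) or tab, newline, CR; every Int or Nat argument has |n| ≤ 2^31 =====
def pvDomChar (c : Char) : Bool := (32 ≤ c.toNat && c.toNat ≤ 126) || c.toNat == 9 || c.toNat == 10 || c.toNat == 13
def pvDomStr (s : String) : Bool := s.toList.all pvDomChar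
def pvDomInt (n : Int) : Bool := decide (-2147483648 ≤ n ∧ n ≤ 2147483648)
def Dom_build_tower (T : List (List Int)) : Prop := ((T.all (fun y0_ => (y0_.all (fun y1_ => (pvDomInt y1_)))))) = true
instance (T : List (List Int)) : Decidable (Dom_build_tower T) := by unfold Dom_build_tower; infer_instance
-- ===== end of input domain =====

-- B replaces A's per-step scan over all piles with one global sort of (value, pile-index)
-- pairs in A's pop order plus a single pass maintaining the pile sums (alternative algorithm,
-- similar cost). A mutates T in place; the equivalence proved is about the return value only.


-- ===== PORT A =====
-- the inner 'for i in range(len(T)): if len(T[i]) != 0: if T[i][-1] > maximum: …' scan;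
-- positions i and idx are range() values, hence Nat is exact for them
def pvScan : List (List Int) → Nat → Int → Nat → Int × Nat
  | [], _, maximum, idx => (maximum, idx)
  | p :: rest, i, maximum, idx =>
    match PySem.List.pyGet? p (-1) with
    | some v => if v > maximum then pvScan rest (i + 1) v i else pvScan rest (i + 1) maximum idx
    | none => pvScan rest (i + 1) maximum idx

-- termination helper for the while loop: popping an element shrinks the total size
theorem pv_sum_set_lt (l : List Nat) (k : Nat) (a : Nat) (hk : k < l.length) (ha : a < l[k]) :
    (l.set k a).sum < l.sum := by
  induction l generalizing k with
  | nil => simp at hk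
  | cons x xs ih =>
    cases k with
    | zero => simp at ha ⊢; omega
    | succ k =>
      simp only [List.set_cons_succ, List.sum_cons]
      have := ih k (by simpa using hk) (by simpa using ha)
      omega

-- the 'while tower_height < max(summary)' loop of A, carrying (T, summary, count, tower_height, idx)
def pvLoopA (piles : List (List Int)) (summary : List Int) (count tower : Int) (idx : Nat) : Int :=
  match PySem.List.max? summary (fun x => x) with
  | none => count        -- Python: max([]) raises ValueError (only for T = [], outside Pre_)
  | some m =>
    if tower < m then
      if hpop : piles.getD (pvScan piles 0 0 idx).2 [] = [] then
        count  -- Python: T[idx].pop() raises IndexError (unreachable from A's entry, see proofs)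
      else
        pvLoopA (piles.set (pvScan piles 0 0 idx).2 (piles.getD (pvScan piles 0 0 idx).2 []).dropLast)
                (summary.set (pvScan piles 0 0 idx).2
                  (summary.getD (pvScan piles 0 0 idx).2 0 -
                    (piles.getD (pvScan piles 0 0 idx).2 []).getLast hpop))
                (count + 1)
                (tower + (piles.getD (pvScan piles 0 0 idx).2 []).getLast hpop)
                (pvScan piles 0 0 idx).2
    else count
termination_by (piles.map List.length).sum
decreasing_by
  have hk : (pvScan piles 0 0 idx).2 < piles.length := by
    by_contra hk
    rw [Nat.not_lt] at hk
    rw [List.getD_eq_default _ _ hk] at hpop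
    exact hpop rfl
  have hget : piles.getD (pvScan piles 0 0 idx).2 [] = piles[(pvScan piles 0 0 idx).2] :=
    List.getD_eq_getElem _ _ hk
  simp only [List.map_set]
  apply pv_sum_set_lt _ _ _ (by simpa using hk)
  rw [hget]
  simp only [List.getElem_map, List.length_dropLast]
  have : piles[(pvScan piles 0 0 idx).2].length ≠ 0 := by
    intro h0
    rw [hget, List.length_eq_zero_iff.mp h0] at hpop
    exact hpop rfl
  omega

def build_tower (T : List (List Int)) : Int :=
  let piles := T.map (fun p => PySem.List.sorted p (fun x => x) false)   -- T[i].sort()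
  let summary := piles.map List.sum                                      -- summary.append(sum(T[i]))
  pvLoopA piles summary 0 0 0

-- ===== PORT B =====
-- '((v, i) for i, p in enumerate(T) for v in p)'
def pvPairs : List (List Int) → Int → List (Int × Int)
  | [], _ => []
  | p :: ps, i => p.map (fun v => (v, i)) ++ pvPairs ps (i + 1)

-- 'for v, i in order: if tower >= max(sums): break; …'
def pvLoopB : List (Int × Int) → List Int → Int → Int → Int
  | [], _, _, count => count
  | (v, i) :: rest, sums, tower, count =>
    match PySem.List.max? sums (fun x => x) with
    | none => count      -- Python: max([]) raises (unreachable: a pair exists, so sums ≠ [])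
    | some m =>
      if tower ≥ m then count
      else pvLoopB rest (sums.set i.toNat (sums.getD i.toNat 0 - v)) (tower + v) (count + 1)

def build_tower_alt (T : List (List Int)) : Int :=
  let sums := T.map List.sum
  let order := PySem.List.sorted2 (pvPairs T 0) (fun t => -t.1) (fun t => t.2) false
  pvLoopB order sums 0 0

-- ===== PRECONDITION & SPEC =====
-- Pre_ excludes exactly T = [], on which Python's max(summary) raises ValueError
def Pre_build_tower (T : List (List Int)) : Prop := T ≠ []
instance (T : List (List Int)) : Decidable (Pre_build_tower T) := by unfold Pre_build_tower; infer_instance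
def pvWitness_build_tower : List (List Int) := [[1, 2], [3]]

def Spec_build_tower (T : List (List Int)) (out : Int) : Prop := out = build_tower_alt T
instance (T : List (List Int)) (out : Int) : Decidable (Spec_build_tower T out) := by unfold Spec_build_tower; infer_instance

-- ===== CLAIM (what is proved, stated in full; the proofs are below) =====
def Claim_equal_build_tower : Prop := ∀ (T : List (List Int)), Dom_build_tower T → Pre_build_tower T → Spec_build_tower T (build_tower T)

-- ===== LEMMAS AND PROOFS =====

-- B's sort order: descending value, then ascending pile index
def pvLexLe (a b : Int × Int) : Prop := b.1 < a.1 ∨ (a.1 = b.1 ∧ a.2 ≤ b.2)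

-- the Boolean comparison PySem.List.sorted2 instantiates for B's key
def pvBefore (a b : Int × Int) : Bool :=
  decide (-a.1 < -b.1) || (!decide (-b.1 < -a.1) && decide (a.2 < b.2))

theorem pvLexLe_of_before (a b : Int × Int) (h : pvBefore a b = true) : pvLexLe a b := by
  simp [pvBefore] at h; simp [pvLexLe]; omega

theorem pvLexLe_of_not_before (a b : Int × Int) (h : pvBefore a b = false) : pvLexLe b a := by
  simp [pvBefore] at h; simp [pvLexLe]; omega

theorem pvLexLe_trans (a b c : Int × Int) (h1 : pvLexLe a b) (h2 : pvLexLe b c) : pvLexLe a c := by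
  simp [pvLexLe] at *; omega

theorem pv_insertBy_pairwise (x : Int × Int) (ys : List (Int × Int))
    (hys : ys.Pairwise pvLexLe) :
    (PySem.List.insertBy pvBefore x ys).Pairwise pvLexLe := by
  induction ys with
  | nil => simp [PySem.List.insertBy]
  | cons y ys ih =>
    rw [List.pairwise_cons] at hys
    obtain ⟨hy, hys⟩ := hys
    simp only [PySem.List.insertBy]
    by_cases hb : pvBefore x y = true
    · rw [if_pos hb]
      have hxy := pvLexLe_of_before _ _ hb
      refine List.Pairwise.cons (fun z hz => ?_) (List.Pairwise.cons hy hys)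
      rcases List.mem_cons.mp hz with rfl | hz
      · exact hxy
      · exact pvLexLe_trans _ _ _ hxy (hy _ hz)
    · rw [if_neg hb]
      have hyx := pvLexLe_of_not_before _ _ (Bool.not_eq_true _ |>.mp hb)
      refine List.Pairwise.cons (fun z hz => ?_) (ih hys)
      rcases (PySem.List.mem_insertBy _ _ _ _).mp hz with rfl | hz
      · exact hyx
      · exact hy _ hz

theorem pv_foldl_insertBy_pairwise (xs acc : List (Int × Int)) (hacc : acc.Pairwise pvLexLe) :
    (xs.foldl (fun acc x => PySem.List.insertBy pvBefore x acc) acc).Pairwise pvLexLe := by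
  induction xs generalizing acc with
  | nil => exact hacc
  | cons x xs ih => exact ih _ (pv_insertBy_pairwise _ _ hacc)

-- PySem has no order lemma for sorted2 (tuple keys); this is its sortedness for B's key
theorem pv_sorted2_pairwise (xs : List (Int × Int)) :
    (PySem.List.sorted2 xs (fun t => -t.1) (fun t => t.2) false).Pairwise pvLexLe := by
  have h : PySem.List.sorted2 xs (fun t => -t.1) (fun t => t.2) false
      = xs.foldl (fun acc x => PySem.List.insertBy pvBefore x acc) [] := rfl
  rw [h]
  exact pv_foldl_insertBy_pairwise xs [] (by simp)

theorem pv_mem_pvPairs (a : Int × Int) (piles : List (List Int)) (i0 : Int) :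
    a ∈ pvPairs piles i0 ↔ ∃ (k : Nat) (h : k < piles.length), a.2 = i0 + k ∧ a.1 ∈ piles[k] := by
  induction piles generalizing i0 with
  | nil => simp [pvPairs]
  | cons p ps ih =>
    simp only [pvPairs, List.mem_append, List.mem_map, ih (i0 + 1)]
    constructor
    · rintro (⟨v, hv, rfl⟩ | ⟨k, hk, h2, h1⟩)
      · exact ⟨0, by simp, by simp, by simpa using hv⟩
      · exact ⟨k + 1, by simpa using hk, by push_cast at h2 ⊢; omega, by simpa using h1⟩
    · rintro ⟨k, hk, h2, h1⟩
      cases k with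
      | zero => exact Or.inl ⟨a.1, by simpa using h1, by simp at h2; rw [← h2]⟩
      | succ k =>
        exact Or.inr ⟨k, by simpa using hk, by push_cast at h2 ⊢; omega, by simpa using h1⟩

theorem pv_pvPairs_append (xs ys : List (List Int)) (i0 : Int) :
    pvPairs (xs ++ ys) i0 = pvPairs xs i0 ++ pvPairs ys (i0 + xs.length) := by
  induction xs generalizing i0 with
  | nil => simp [pvPairs]
  | cons p ps ih =>
    simp only [List.cons_append, pvPairs, ih (i0 + 1), List.append_assoc, List.length_cons]
    congr 3
    push_cast
    ring

theorem pv_pvPairs_perm (piles piles' : List (List Int)) (i0 : Int)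
    (h : List.Forall₂ List.Perm piles piles') :
    (pvPairs piles i0).Perm (pvPairs piles' i0) := by
  induction h generalizing i0 with
  | nil => simp [pvPairs]
  | cons hpq _ ih => exact (hpq.map _).append (ih (i0 + 1))

theorem pv_exists_pos_of_sum_pos (l : List Int) (h : 0 < l.sum) : ∃ x ∈ l, 0 < x := by
  by_contra hc
  simp only [not_exists, not_and, not_lt] at hc
  have : l.sum ≤ 0 := by
    clear h
    induction l with
    | nil => simp
    | cons x xs ih =>
      have h1 := hc x (by simp)
      have h2 := ih (fun y hy => hc y (List.mem_cons_of_mem _ hy))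
      simp only [List.sum_cons]
      omega
  omega

theorem pv_getLast_eq (p : List Int) (hp : p.Pairwise (· ≤ ·)) (v : Int) (hv : v ∈ p)
    (hmax : ∀ y ∈ p, y ≤ v) : p.getLast? = some v := by
  have hne : p ≠ [] := List.ne_nil_of_mem hv
  rw [List.getLast?_eq_some_getLast hne]
  congr 1
  have hle : p.getLast hne ≤ v := hmax _ (List.getLast_mem hne)
  have hsplit := List.dropLast_concat_getLast hne
  have hge : v ≤ p.getLast hne := by
    conv at hv => rw [← hsplit]
    rcases List.mem_append.mp hv with hmem | hmem
    · conv at hp => rw [← hsplit]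
      rcases List.pairwise_append.mp hp with ⟨_, _, hcross⟩
      exact hcross v hmem _ (by simp)
    · simp at hmem; omega
  omega

theorem pvScan_cons_none (p : List Int) (rest : List (List Int)) (i : Nat) (m : Int) (idx : Nat)
    (h : p.getLast? = none) : pvScan (p :: rest) i m idx = pvScan rest (i + 1) m idx := by
  simp [pvScan, PySem.List.pyGet?_neg_one, h]

theorem pvScan_cons_some (p : List Int) (rest : List (List Int)) (i : Nat) (m : Int) (idx : Nat)
    (v : Int) (h : p.getLast? = some v) :
    pvScan (p :: rest) i m idx =
      if v > m then pvScan rest (i + 1) v i else pvScan rest (i + 1) m idx := by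
  simp [pvScan, PySem.List.pyGet?_neg_one, h]

theorem pvScan_const (ps : List (List Int)) (i0 : Nat) (m : Int) (idx : Nat)
    (h : ∀ p ∈ ps, ∀ l, p.getLast? = some l → l ≤ m) : pvScan ps i0 m idx = (m, idx) := by
  induction ps generalizing i0 with
  | nil => simp [pvScan]
  | cons p ps ih =>
    cases hl : p.getLast? with
    | none =>
      rw [pvScan_cons_none _ _ _ _ _ hl]
      exact ih (i0 + 1) (fun q hq => h q (List.mem_cons_of_mem _ hq))
    | some l =>
      have := h p (by simp) l hl
      rw [pvScan_cons_some _ _ _ _ _ _ hl, if_neg (by omega)]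
      exact ih (i0 + 1) (fun q hq => h q (List.mem_cons_of_mem _ hq))

theorem pvScan_spec (pre : List (List Int)) (pj : List Int) (post : List (List Int))
    (i0 : Nat) (m0 : Int) (idx0 : Nat) (v : Int)
    (hj : pj.getLast? = some v) (hm : m0 < v)
    (hpre : ∀ p ∈ pre, ∀ l, p.getLast? = some l → l < v)
    (hpost : ∀ p ∈ post, ∀ l, p.getLast? = some l → l ≤ v) :
    pvScan (pre ++ pj :: post) i0 m0 idx0 = (v, i0 + pre.length) := by
  induction pre generalizing i0 m0 idx0 with
  | nil =>
    rw [List.nil_append, pvScan_cons_some _ _ _ _ _ _ hj, if_pos (by omega),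
      pvScan_const post (i0 + 1) v i0 hpost]
    simp
  | cons p pre ih =>
    have hpre' : ∀ q ∈ pre, ∀ l, q.getLast? = some l → l < v :=
      fun q hq => hpre q (List.mem_cons_of_mem _ hq)
    rw [List.cons_append]
    cases hl : p.getLast? with
    | none =>
      rw [pvScan_cons_none _ _ _ _ _ hl, ih (i0 + 1) m0 idx0 hm hpre']
      simp only [List.length_cons]
      congr 1
      omega
    | some l =>
      have hlv := hpre p (by simp) l hl
      rw [pvScan_cons_some _ _ _ _ _ _ hl]
      by_cases hcmp : l > m0
      · rw [if_pos hcmp, ih (i0 + 1) l i0 hlv hpre']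
        simp only [List.length_cons]
        congr 1
        omega
      · rw [if_neg hcmp, ih (i0 + 1) m0 idx0 hm hpre']
        simp only [List.length_cons]
        congr 1
        omega

theorem pv_main (order : List (Int × Int)) (piles : List (List Int)) (summary : List Int)
    (tower count : Int) (idx : Nat)
    (hsum : summary = piles.map List.sum)
    (hsorted : ∀ p ∈ piles, p.Pairwise (· ≤ ·))
    (hperm : order.Perm (pvPairs piles 0))
    (hpw : order.Pairwise pvLexLe)
    (htower : 0 ≤ tower) :
    pvLoopA piles summary count tower idx = pvLoopB order summary tower count := by
  induction order generalizing piles summary tower count idx with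
  | nil =>
    -- A's loop condition must be false: a positive remaining sum would give a remaining pair
    have hpairs : pvPairs piles 0 = [] := List.Perm.eq_nil hperm.symm
    cases hmax : PySem.List.max? summary (fun x => x) with
    | none => rw [pvLoopA.eq_def, hmax]; rfl
    | some m =>
      have hge : ¬ tower < m := by
        intro hlt
        obtain ⟨q, hq, hqsum⟩ := List.mem_map.mp (hsum ▸ PySem.List.max?_mem hmax)
        obtain ⟨x, hx, hxpos⟩ := pv_exists_pos_of_sum_pos q (by omega)
        obtain ⟨k, hk, hqk⟩ := List.mem_iff_getElem.mp hq
        have : ((x, (k : Int)) : Int × Int) ∈ pvPairs piles 0 :=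
          (pv_mem_pvPairs _ _ _).mpr ⟨k, hk, by simp, by rw [hqk]; exact hx⟩
        rw [hpairs] at this
        simp at this
      rw [pvLoopA.eq_def, hmax]
      dsimp only
      rw [if_neg hge]
      rfl
  | cons a rest ih =>
    obtain ⟨v, i⟩ := a
    cases hmax : PySem.List.max? summary (fun x => x) with
    | none =>
      have : summary = [] := (PySem.List.max?_eq_none_iff _ _).mp hmax
      have : piles = [] := by
        rw [this] at hsum; exact List.map_eq_nil_iff.mp hsum.symm
      rw [this] at hperm
      simp [pvPairs] at hperm
    | some m =>
      by_cases hlt : tower < m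
      · -- the continuing step: A pops exactly B's head pair (v, i)
        have hvi : ((v, i) : Int × Int) ∈ pvPairs piles 0 := hperm.subset List.mem_cons_self
        obtain ⟨k, hk, hi, hvmem⟩ := (pv_mem_pvPairs _ _ _).mp hvi
        simp only at hi hvmem
        have hik : i = (k : Int) := by omega
        -- every remaining value is ≤ v
        have hval : ∀ a ∈ pvPairs piles 0, a.1 ≤ v := by
          intro a ha
          rcases List.mem_cons.mp (hperm.mem_iff.mpr ha) with rfl | hrest
          · rfl
          · have := (List.pairwise_cons.mp hpw).1 a hrest
            rcases this with h1 | ⟨h1, _⟩ <;> omega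
        have hvalmem : ∀ (k' : Nat) (hk' : k' < piles.length), ∀ y ∈ piles[k'], y ≤ v := by
          intro k' hk' y hy
          exact hval (y, (k' : Int)) ((pv_mem_pvPairs _ _ _).mpr ⟨k', hk', by simp, hy⟩)
        -- k is the least pile index whose top is v
        have hmin : ∀ (k' : Nat) (hk' : k' < piles.length), v ∈ piles[k'] → k ≤ k' := by
          intro k' hk' hv'
          have hmem : ((v, (k' : Int)) : Int × Int) ∈ pvPairs piles 0 :=
            (pv_mem_pvPairs _ _ _).mpr ⟨k', hk', by simp, hv'⟩
          rcases List.mem_cons.mp (hperm.mem_iff.mpr hmem) with heq | hrest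
          · have : i = (k' : Int) := (congrArg Prod.snd heq).symm
            omega
          · have := (List.pairwise_cons.mp hpw).1 _ hrest
            simp only [pvLexLe] at this
            rcases this with h1 | ⟨_, h2⟩
            · simp at h1
            · omega
        -- v is positive (some pile still has a positive sum)
        have hvpos : 0 < v := by
          obtain ⟨q, hq, hqsum⟩ := List.mem_map.mp (hsum ▸ PySem.List.max?_mem hmax)
          obtain ⟨x, hx, hxpos⟩ := pv_exists_pos_of_sum_pos q (by omega)
          obtain ⟨k', hk', hqk⟩ := List.mem_iff_getElem.mp hq
          have := hval (x, (k' : Int)) ((pv_mem_pvPairs _ _ _).mpr ⟨k', hk', by simp, by rw [hqk]; exact hx⟩)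
          simp at this
          omega
        -- pile k is sorted with maximum v, so its last element is v
        have hlast : piles[k].getLast? = some v :=
          pv_getLast_eq piles[k] (hsorted _ (List.getElem_mem hk)) v hvmem (hvalmem k hk)
        -- A's scan finds (v, k)
        have hscan : pvScan piles 0 0 idx = (v, k) := by
          have hdecomp : piles.take k ++ piles[k] :: piles.drop (k + 1) = piles := by
            rw [← List.set_eq_take_cons_drop piles[k] hk]; exact List.set_getElem_self ..
          have htk : (piles.take k).length = k := List.length_take_of_le (by omega)
          have := pvScan_spec (piles.take k) piles[k] (piles.drop (k + 1)) 0 0 idx v hlast hvpos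
            (by
              intro p hp l hl
              obtain ⟨j, hj, hgj⟩ := List.mem_take_iff_getElem.mp hp
              have hjk : j < k := by omega
              have hjlen : j < piles.length := by omega
              have hlmem : l ∈ piles[j]'hjlen := by
                rw [hgj]
                exact List.mem_of_getLast? hl
              have hle := hvalmem j hjlen l hlmem
              rcases eq_or_lt_of_le hle with rfl | h
              · exact absurd (hmin j hjlen hlmem) (by omega)
              · exact h)
            (by
              intro p hp l hl
              obtain ⟨j, hj, hgj⟩ := List.mem_drop_iff_getElem.mp hp
              have hlmem : l ∈ piles[k + 1 + j]'(by omega) := by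
                rw [hgj]
                exact List.mem_of_getLast? hl
              exact hvalmem (k + 1 + j) (by omega) l hlmem)
          rw [hdecomp] at this
          rw [this, htk]
          simp
        have hklen : k < summary.length := by rw [hsum]; simpa using hk
        have hgetp : piles.getD k [] = piles[k] := List.getD_eq_getElem _ _ hk
        have hne : piles.getD k [] ≠ [] := by
          rw [hgetp]; exact List.ne_nil_of_mem hvmem
        have hpilene : piles[k] ≠ [] := by rw [← hgetp]; exact hne
        have hlastv : (piles.getD k []).getLast hne = v := by
          have := List.getLast?_eq_some_getLast (l := piles[k]) hpilene
          rw [this] at hlast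
          simp only [hgetp]
          exact (Option.some_injective _ hlast.symm).symm
        have hsummk : summary.getD k 0 = piles[k].sum := by
          rw [hsum, List.getD_eq_getElem _ _ (by simpa using hk)]
          simp
        -- the element decomposition of pile k
        have hsplit : piles[k].dropLast ++ [v] = piles[k] := by
          have h1 := List.dropLast_concat_getLast hpilene
          have h2 : piles[k].getLast hpilene = v := by
            have := List.getLast?_eq_some_getLast (l := piles[k]) hpilene
            rw [this] at hlast
            exact Option.some_injective _ hlast
          rw [← h2]; exact h1
        -- new state
        set piles' := piles.set k piles[k].dropLast with hpiles'
        set summary' := summary.set k (summary.getD k 0 - v) with hsummary'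
        -- invariants for the new state
        have hsum' : summary' = piles'.map List.sum := by
          rw [hsummary', hpiles', List.map_set, hsummk, hsum]
          congr 1
          have : (piles[k].dropLast ++ [v]).sum = piles[k].sum := by rw [hsplit]
          rw [List.sum_append] at this
          simp at this
          omega
        have hsorted' : ∀ p ∈ piles', p.Pairwise (· ≤ ·) := by
          intro p hp
          rcases List.mem_or_eq_of_mem_set hp with hmem | rfl
          · exact hsorted p hmem
          · exact List.Pairwise.sublist (List.dropLast_sublist _) (hsorted _ (List.getElem_mem hk))
        have hperm' : rest.Perm (pvPairs piles' 0) := by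
          have hdecomp : piles.take k ++ piles[k] :: piles.drop (k + 1) = piles := by
            rw [← List.set_eq_take_cons_drop piles[k] hk]; exact List.set_getElem_self ..
          have htk : (piles.take k).length = k := List.length_take_of_le (by omega)
          have e1 : pvPairs piles 0 =
              pvPairs (piles.take k) 0 ++ (piles[k].map (fun v => (v, (k : Int))) ++
                pvPairs (piles.drop (k + 1)) (0 + (k : Int) + 1)) := by
            conv_lhs => rw [← hdecomp]
            rw [pv_pvPairs_append, htk]
            simp [pvPairs]
          have e2 : pvPairs piles' 0 =
              pvPairs (piles.take k) 0 ++ (piles[k].dropLast.map (fun v => (v, (k : Int))) ++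
                pvPairs (piles.drop (k + 1)) (0 + (k : Int) + 1)) := by
            have hdecomp' : piles' = piles.take k ++ piles[k].dropLast :: piles.drop (k + 1) :=
              List.set_eq_take_cons_drop _ hk
            rw [hdecomp', pv_pvPairs_append, htk]
            simp [pvPairs]
          have e3 : piles[k].map (fun v => (v, (k : Int))) =
              piles[k].dropLast.map (fun v => (v, (k : Int))) ++ [(v, (k : Int))] := by
            conv_lhs => rw [← hsplit]
            rw [List.map_append]
            rfl
          have hstep : (pvPairs piles 0).Perm (((v, (k : Int)) : Int × Int) :: pvPairs piles' 0) := by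
            rw [e1, e2, e3]
            have heq1 : pvPairs (piles.take k) 0 ++ ((piles[k].dropLast.map (fun v => (v, (k : Int))) ++ [(v, (k : Int))]) ++ pvPairs (piles.drop (k + 1)) (0 + (k : Int) + 1)) = (pvPairs (piles.take k) 0 ++ piles[k].dropLast.map (fun v => (v, (k : Int)))) ++ (((v, (k : Int)) : Int × Int) :: pvPairs (piles.drop (k + 1)) (0 + (k : Int) + 1)) := by
              simp [List.append_assoc]
            have heq2 : (((v, (k : Int)) : Int × Int) :: ((pvPairs (piles.take k) 0 ++ piles[k].dropLast.map (fun v => (v, (k : Int)))) ++ pvPairs (piles.drop (k + 1)) (0 + (k : Int) + 1))) = (((v, (k : Int)) : Int × Int) :: (pvPairs (piles.take k) 0 ++ (piles[k].dropLast.map (fun v => (v, (k : Int))) ++ pvPairs (piles.drop (k + 1)) (0 + (k : Int) + 1)))) := by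
              simp [List.append_assoc]
            rw [heq1, ← heq2]
            exact List.perm_middle
          have : (((v, i) : Int × Int) :: rest).Perm (((v, (k : Int)) : Int × Int) :: pvPairs piles' 0) :=
            hperm.trans hstep
          rw [hik] at this
          exact this.cons_inv
        have hpw' : rest.Pairwise pvLexLe := (List.pairwise_cons.mp hpw).2
        have htower' : (0 : Int) ≤ tower + v := by omega
        -- A's step
        have hstepA : pvLoopA piles summary count tower idx =
            pvLoopA piles' summary' (count + 1) (tower + v) k := by
          rw [pvLoopA.eq_def, hmax]
          dsimp only
          rw [if_pos hlt]
          rw [hscan]  -- note: (v, k).2 = k definitionally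
          dsimp only
          rw [dif_neg hne, hlastv, hgetp]
        -- B's step
        have hstepB : pvLoopB (((v, i) : Int × Int) :: rest) summary tower count =
            pvLoopB rest summary' (tower + v) (count + 1) := by
          rw [pvLoopB, hmax]
          dsimp only
          rw [if_neg (by omega), hik]
          simp [hsummary']
        rw [hstepA, hstepB]
        exact ih piles' summary' (tower + v) (count + 1) k hsum' hsorted' hperm' hpw' htower'
      · -- both loops stop and return count
        rw [pvLoopA.eq_def, hmax]
        dsimp only
        rw [if_neg hlt]
        rw [pvLoopB, hmax]
        dsimp only
        rw [if_pos (by omega)]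

-- ===== VERDICT (by name: the statement is the Claim_ definition above) =====
theorem build_tower_spec : Claim_equal_build_tower := by
  intro T _ _
  unfold Spec_build_tower build_tower build_tower_alt
  show pvLoopA (T.map (fun p => PySem.List.sorted p (fun x => x) false))
      ((T.map (fun p => PySem.List.sorted p (fun x => x) false)).map List.sum) 0 0 0 =
    pvLoopB (PySem.List.sorted2 (pvPairs T 0) (fun t => -t.1) (fun t => t.2) false)
      (T.map List.sum) 0 0
  have hsums : T.map List.sum = (T.map (fun p => PySem.List.sorted p (fun x => x) false)).map List.sum := by
    rw [List.map_map]
    exact List.map_congr_left (fun p _ => ((PySem.List.sorted_perm p _ _).sum_eq).symm)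
  rw [← hsums]
  apply pv_main
  · exact hsums
  · intro p hp
    obtain ⟨q, _, rfl⟩ := List.mem_map.mp hp
    have := PySem.List.sorted_pairwise q (fun x => x)
    simpa using this
  · refine (PySem.List.sorted2_perm _ _ _ _).trans (pv_pvPairs_perm _ _ _ ?_)
    rw [List.forall₂_map_right_iff]
    exact List.forall₂_same.mpr (fun p _ => (PySem.List.sorted_perm p _ _).symm)
  · exact pv_sorted2_pairwise _
  · exact le_refl 0
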